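-- pv_equiv track=rewrite | github.com/Microck/MindLocker | backend/backend.py | get_domains_from_keys
-- ===== SOURCE A (Python) =====
-- SITES_CONFIG = {
--     "Social Media": {"Twitter/X": ["twitter.com", "x.com"], "Instagram": ["instagram.com"], "Facebook": ["facebook.com"], "Reddit": ["reddit.com"], "LinkedIn": ["linkedin.com"], "TikTok": ["tiktok.com"], "Pinterest": ["pinterest.com"], "Threads": ["threads.net"]},
--     "Communication": {"Discord": ["discord.com", "cdn.discordapp.com"], "WhatsApp Web": ["web.whatsapp.com"], "Telegram Web": ["web.telegram.org"]},
--     "Streaming & Video": {"YouTube": ["youtube.com", "m.youtube.com"], "Netflix": ["netflix.com"], "Twitch": ["twitch.tv"]},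
--     "News": {"CNN": ["cnn.com"], "BBC News": ["bbc.com"], "NY Times": ["nytimes.com"]},
--     "General Distractions": {"9gag": ["9gag.com"]}
-- }
--
-- def get_domains_from_keys(site_keys):
--     domains = set()
--     flat_sites = {name: urls for category in SITES_CONFIG.values() for name, urls in category.items()}
--     for key in site_keys:
--         if key in flat_sites:
--             # Add www. subdomain for broader blocking
--             for domain in flat_sites[key]:
--                 domains.add(domain)
--                 if not domain.startswith("www."):
--                     domains.add(f"www.{domain}")
--     return list(domains)
-- ===== SOURCE B (Python) =====
-- SITES_CONFIG = {
--     "Social Media": {"Twitter/X": ["twitter.com", "x.com"], "Instagram": ["instagram.com"], "Facebook": ["facebook.com"], "Reddit": ["reddit.com"], "LinkedIn": ["linkedin.com"], "TikTok": ["tiktok.com"], "Pinterest": ["pinterest.com"], "Threads": ["threads.net"]},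
--     "Communication": {"Discord": ["discord.com", "cdn.discordapp.com"], "WhatsApp Web": ["web.whatsapp.com"], "Telegram Web": ["web.telegram.org"]},
--     "Streaming & Video": {"YouTube": ["youtube.com", "m.youtube.com"], "Netflix": ["netflix.com"], "Twitch": ["twitch.tv"]},
--     "News": {"CNN": ["cnn.com"], "BBC News": ["bbc.com"], "NY Times": ["nytimes.com"]},
--     "General Distractions": {"9gag": ["9gag.com"]}
-- }
--
--
-- def get_domains_from_keys(site_keys):
--     # No flat index is built: each key is resolved by scanning the nested
--     # config directly (site names are unique across categories, so the first
--     # category containing the key is the only one).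
--     domains = set()
--     for key in site_keys:
--         for category in SITES_CONFIG.values():
--             if key in category:
--                 for domain in category[key]:
--                     domains.add(domain)
--                     if not domain.startswith("www."):
--                         domains.add("www." + domain)
--                 break
--     return list(domains)
-- ===== Notes on version B (the rewrite author's own statement) =====
-- stated objective: alternative
-- what changed: B builds no flat name->urls index at all: each key is resolved by scanning SITES_CONFIG's category dicts in order and expanding the first category's entry on a hit (correct because site names are unique across categories, matching A's flat-dict overwrite semantics), instead of A's comprehension that flattens the whole config into one dict before any lookup.
import Mathlib
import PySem

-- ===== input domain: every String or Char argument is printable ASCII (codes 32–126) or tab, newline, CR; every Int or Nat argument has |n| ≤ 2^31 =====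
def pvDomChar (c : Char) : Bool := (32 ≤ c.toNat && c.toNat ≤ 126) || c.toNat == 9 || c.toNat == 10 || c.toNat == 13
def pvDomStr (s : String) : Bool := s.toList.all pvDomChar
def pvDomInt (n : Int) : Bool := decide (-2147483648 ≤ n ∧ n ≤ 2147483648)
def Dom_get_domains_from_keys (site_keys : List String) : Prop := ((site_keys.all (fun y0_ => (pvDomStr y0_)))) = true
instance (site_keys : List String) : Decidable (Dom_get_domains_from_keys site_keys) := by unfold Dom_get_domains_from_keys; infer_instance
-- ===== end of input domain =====

-- B builds no flat name→urls index: each key is resolved by scanning the nested config's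
-- categories directly, expanding the first category that contains it (site names are unique
-- across categories, so this matches A's flat-dict lookup); objective: alternative.
-- The Python return value is list(<set>): the proved list equality is over PySem.Set's
-- insertion-order model of the set's contents.

def pvSITES_CONFIG : List (String × List (String × List String)) := [
  ("Social Media", [("Twitter/X", ["twitter.com", "x.com"]), ("Instagram", ["instagram.com"]),
    ("Facebook", ["facebook.com"]), ("Reddit", ["reddit.com"]), ("LinkedIn", ["linkedin.com"]),
    ("TikTok", ["tiktok.com"]), ("Pinterest", ["pinterest.com"]), ("Threads", ["threads.net"])]),
  ("Communication", [("Discord", ["discord.com", "cdn.discordapp.com"]),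
    ("WhatsApp Web", ["web.whatsapp.com"]), ("Telegram Web", ["web.telegram.org"])]),
  ("Streaming & Video", [("YouTube", ["youtube.com", "m.youtube.com"]),
    ("Netflix", ["netflix.com"]), ("Twitch", ["twitch.tv"])]),
  ("News", [("CNN", ["cnn.com"]), ("BBC News", ["bbc.com"]), ("NY Times", ["nytimes.com"])]),
  ("General Distractions", [("9gag", ["9gag.com"])])]

-- ===== PORT A =====
def get_domains_from_keys (site_keys : List String) : List String :=
  -- flat_sites = {name: urls for category in SITES_CONFIG.values() for name, urls in category.items()}
  let flat_sites : PySem.Dict String (List String) :=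
    ((pvSITES_CONFIG.map Prod.snd).flatten).foldl
      (fun d p => d.insert p.1 p.2) (PySem.Dict.mk [])
  site_keys.foldl (fun domains key =>
    match flat_sites.get? key with
    | some urls =>
        urls.foldl (fun ds domain =>
          let ds := PySem.Set.add ds domain
          if PySem.Str.startswith domain "www." then ds
          else PySem.Set.add ds ("www." ++ domain)) domains
    | none => domains) (PySem.Set.empty)

-- ===== PORT B =====
-- 'for category in SITES_CONFIG.values(): if key in category: …; break' — the recursion
-- returns at the first category containing key (the break) and otherwise scans on;
-- 'key in category' + 'category[key]' on the assoc-list dict is the first (unique) match.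
def pvScanCats (key : String) (cats : List (List (String × List String)))
    (domains : PySem.Set String) : PySem.Set String :=
  match cats with
  | [] => domains
  | cat :: rest =>
    match cat.find? (fun p => p.1 == key) with
    | some p =>
        p.2.foldl (fun ds domain =>
          let ds := PySem.Set.add ds domain
          if PySem.Str.startswith domain "www." then ds
          else PySem.Set.add ds ("www." ++ domain)) domains
    | none => pvScanCats key rest domains

def get_domains_from_keys_alt (site_keys : List String) : List String :=
  site_keys.foldl (fun domains key =>
    pvScanCats key (pvSITES_CONFIG.map Prod.snd) domains) (PySem.Set.empty)

-- ===== PRECONDITION & SPEC =====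
def Spec_get_domains_from_keys (site_keys : List String) (out : List String) : Prop := out = get_domains_from_keys_alt site_keys
instance (site_keys : List String) (out : List String) : Decidable (Spec_get_domains_from_keys site_keys out) := by unfold Spec_get_domains_from_keys; infer_instance

-- ===== CLAIM (what is proved, stated in full; the proofs are below) =====
def Claim_equal_get_domains_from_keys : Prop := ∀ (site_keys : List String), Dom_get_domains_from_keys site_keys → Spec_get_domains_from_keys site_keys (get_domains_from_keys site_keys)

-- ===== LEMMAS AND PROOFS =====

-- A's flat dict, hoisted out of the port for the proofs (A defines it by the same fold inside a let).
def pvFlatA : PySem.Dict String (List String) :=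
  ((pvSITES_CONFIG.map Prod.snd).flatten).foldl
    (fun d p => d.insert p.1 p.2) (PySem.Dict.mk [])

-- Site names are unique across categories, so A's insert-fold keeps every pair of the
-- flattened config in order: the flat dict's items ARE the flattened list.
lemma pvFlatA_items :
    pvFlatA.items = (pvSITES_CONFIG.map Prod.snd).flatten := by decide

-- B's category scan computes the first match of key in the flattened config.
lemma pvScan_eq_find (key : String) (cats : List (List (String × List String)))
    (domains : PySem.Set String) :
    pvScanCats key cats domains =
      match cats.flatten.find? (fun p => p.1 == key) with
      | some p =>
          p.2.foldl (fun ds domain =>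
            let ds := PySem.Set.add ds domain
            if PySem.Str.startswith domain "www." then ds
            else PySem.Set.add ds ("www." ++ domain)) domains
      | none => domains := by
  induction cats with
  | nil => rfl
  | cons cat rest ih =>
    simp only [pvScanCats, List.flatten_cons, List.find?_append]
    cases h : cat.find? (fun p => p.1 == key) with
    | some p => rfl
    | none => simpa using ih

lemma pvMain (keys : List String) (s : PySem.Set String) :
    keys.foldl (fun domains key =>
      match pvFlatA.get? key with
      | some urls =>
          urls.foldl (fun ds domain =>
            let ds := PySem.Set.add ds domain
            if PySem.Str.startswith domain "www." then ds
            else PySem.Set.add ds ("www." ++ domain)) domains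
      | none => domains) s
    = keys.foldl (fun domains key =>
        pvScanCats key (pvSITES_CONFIG.map Prod.snd) domains) s := by
  induction keys generalizing s with
  | nil => rfl
  | cons k t ih =>
    simp only [List.foldl_cons]
    rw [← ih]
    congr 1
    rw [pvScan_eq_find]
    simp only [PySem.Dict.get?, pvFlatA_items]
    cases (pvSITES_CONFIG.map Prod.snd).flatten.find? (fun p => p.1 == k) <;> rfl

-- ===== VERDICT (by name: the statement is the Claim_ definition above) =====
theorem get_domains_from_keys_spec : Claim_equal_get_domains_from_keys := by
  intro site_keys _
  unfold Spec_get_domains_from_keys get_domains_from_keys get_domains_from_keys_alt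
  exact pvMain site_keys PySem.Set.empty
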